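-- pv_equiv track=rewrite | github.com/m32jawad/MahjongGame | app.py | can_form_sets
-- ===== SOURCE A (Python) =====
-- def can_form_sets(tile_ids):
--     # Recursively check if tile_ids can be partitioned into sets (pung/chow).
--     if not tile_ids:
--          return True
--     first = tile_ids[0]
--     # Check for pung:
--     if tile_ids.count(first) >= 3:
--          new_ids = tile_ids.copy()
--          for _ in range(3):
--               new_ids.remove(first)
--          if can_form_sets(new_ids):
--               return True
--     # Check for chow (only for suited tiles, assume ids 0–26 are suited)
--     if first <= 26:
--          second, third = first+1, first+2
--          if second in tile_ids and third in tile_ids: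
--               new_ids = tile_ids.copy()
--               new_ids.remove(first)
--               new_ids.remove(second)
--               new_ids.remove(third)
--               if can_form_sets(new_ids):
--                    return True
--     return False
-- ===== SOURCE B (Python) =====
-- def _encode(ids):
--     # run-length encode the hand, preserving order
--     rle = []
--     for t in ids:
--         if rle and rle[-1][0] == t:
--             v, k = rle[-1]
--             rle[-1] = (v, k + 1)
--         else:
--             rle.append((t, 1))
--     return rle
--
--
-- def _count(rle, x):
--     c = 0
--     for v, k in rle:
--         if v == x:
--             c += k
--     return c
--
--
-- def _drop(rle, x, m):
--     # drop the first m occurrences of x (RLE in, RLE out)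
--     out = []
--     for v, k in rle:
--         if m > 0 and v == x:
--             take = k if k < m else m
--             m -= take
--             k -= take
--         if k > 0:
--             out.append((v, k))
--     return out
--
--
-- def can_form_sets(tile_ids):
--     # memoized search over run-length-encoded hands
--     memo = {}
--
--     def solve(s):
--         key = tuple(s)
--         r = memo.get(key)
--         if r is not None:
--             return r
--         if not s:
--             r = True
--         else:
--             x = s[0][0]
--             r = False
--             if _count(s, x) >= 3:
--                 r = solve(_drop(s, x, 3))
--             if not r and x <= 26:
--                 if _count(s, x + 1) >= 1 and _count(s, x + 2) >= 1:
--                     r = solve(_drop(_drop(_drop(s, x, 1), x + 1, 1), x + 2, 1))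
--         memo[key] = r
--         return r
--
--     return solve(_encode(tile_ids))
-- ===== Notes on version B (the rewrite author's own statement) =====
-- stated objective: faster
-- what changed: B replaces A's naive recursion on the raw tile list (repeated count/in scans and one-at-a-time removes, recomputing the same sub-hands over and over) by a memoized search over run-length-encoded hands: each distinct remaining hand is solved once and each pung/chow is removed with a single pass over the runs; intended as faster, measured 147.7x at n=16384, the largest size both finish (at n=65536 A times out and B exceeds the runner's recursion-depth cap, so the probe reports the speed-up as unconfirmed at that size).
import Mathlib
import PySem

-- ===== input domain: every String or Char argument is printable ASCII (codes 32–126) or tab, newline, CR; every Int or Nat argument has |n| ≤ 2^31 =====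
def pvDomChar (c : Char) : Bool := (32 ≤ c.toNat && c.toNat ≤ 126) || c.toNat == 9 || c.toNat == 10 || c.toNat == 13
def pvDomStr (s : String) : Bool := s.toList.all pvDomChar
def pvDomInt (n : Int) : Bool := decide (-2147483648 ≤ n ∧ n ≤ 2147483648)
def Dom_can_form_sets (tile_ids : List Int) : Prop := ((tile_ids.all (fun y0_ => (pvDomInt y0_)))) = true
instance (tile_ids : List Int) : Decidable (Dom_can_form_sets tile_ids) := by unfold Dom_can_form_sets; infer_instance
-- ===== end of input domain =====

-- B runs the search on a run-length-encoded hand with a memo dict keyed by the encoded hand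
-- (each distinct remaining hand is solved once), instead of A's naive recursion on the raw
-- list; intended as faster: a timing run measured B 147.7x faster at n=16384, the largest
-- size both finish (at n=65536 A times out and B exceeds the runner's recursion-depth cap).

-- ===== PORT A =====

-- new_ids.remove(v): ValueError is impossible here, every remove in A is guarded
def pvRemove1 (xs : List Int) (v : Int) : List Int :=
  match PySem.List.remove? xs v with
  | some ys => ys
  | none => xs

-- 'for _ in range(n): new_ids.remove(v)'
def pvRemoveN (xs : List Int) (v : Int) : Nat → List Int
  | 0 => xs
  | n + 1 => pvRemoveN (pvRemove1 xs v) v n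

theorem pvRemove1_eq_erase {xs : List Int} {v : Int} (h : v ∈ xs) :
    pvRemove1 xs v = xs.erase v := by
  simp [pvRemove1, PySem.List.remove?_eq_some_erase xs v h]

theorem pvRemove1_length_of_mem {xs : List Int} {v : Int} (h : v ∈ xs) :
    (pvRemove1 xs v).length + 1 = xs.length := by
  have hpos : 0 < xs.length := List.length_pos_of_mem h
  rw [pvRemove1_eq_erase h]
  simp [List.length_erase_of_mem h]
  omega

theorem pvRemoveN_length {n : Nat} : ∀ {xs : List Int} {v : Int},
    n ≤ PySem.List.count xs v → (pvRemoveN xs v n).length + n = xs.length := by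
  induction n with
  | zero => intro xs v _; simp [pvRemoveN]
  | succ m ih =>
    intro xs v h
    have hc : 0 < List.count v xs := by
      have := h; simp [PySem.List.count_eq] at this; omega
    have hmem : v ∈ xs := List.count_pos_iff.mp hc
    have h2 : m ≤ PySem.List.count (pvRemove1 xs v) v := by
      simp [PySem.List.count_eq, pvRemove1_eq_erase hmem, List.count_erase_self] at *
      omega
    have := ih (xs := pvRemove1 xs v) (v := v) h2
    have := pvRemove1_length_of_mem hmem
    simp [pvRemoveN]
    omega

def can_form_sets (tile_ids : List Int) : Bool :=
  match htl : tile_ids with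
  | [] => true
  | first :: _ =>
    (if hp : 3 ≤ PySem.List.count tile_ids first then
        can_form_sets (pvRemoveN tile_ids first 3)
      else false)
    ||
    (if hc : first ≤ 26 ∧ (first + 1) ∈ tile_ids ∧ (first + 2) ∈ tile_ids then
        can_form_sets (pvRemove1 (pvRemove1 (pvRemove1 tile_ids first) (first + 1)) (first + 2))
      else false)
termination_by tile_ids.length
decreasing_by
  · have := pvRemoveN_length (n := 3) hp
    rw [htl] at this ⊢
    simp only [List.length_cons] at *
    omega
  · rename_i tail
    rw [← htl]
    have h0 : first ∈ tile_ids := by rw [htl]; exact List.mem_cons_self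
    have h1 : (first + 1) ∈ pvRemove1 tile_ids first := by
      rw [pvRemove1_eq_erase h0]
      exact (List.mem_erase_of_ne (by omega)).mpr hc.2.1
    have h2 : (first + 2) ∈ pvRemove1 (pvRemove1 tile_ids first) (first + 1) := by
      rw [pvRemove1_eq_erase h1, pvRemove1_eq_erase h0]
      refine (List.mem_erase_of_ne (by omega)).mpr ?_
      exact (List.mem_erase_of_ne (by omega)).mpr hc.2.2
    have l0 := pvRemove1_length_of_mem h0
    have l1 := pvRemove1_length_of_mem h1
    have l2 := pvRemove1_length_of_mem h2
    omega

-- ===== PORT B =====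

-- rle[-1] merge step of B's _encode loop
def pvEncodeStep (rle : List (Int × Int)) (t : Int) : List (Int × Int) :=
  match rle.getLast? with
  | some (v, k) => if v = t then rle.dropLast ++ [(v, k + 1)] else rle ++ [(t, 1)]
  | none => rle ++ [(t, 1)]

def pvEncode (ids : List Int) : List (Int × Int) := ids.foldl pvEncodeStep []

def pvRleCount : List (Int × Int) → Int → Int
  | [], _ => 0
  | (v, k) :: rest, x => (if v = x then k else 0) + pvRleCount rest x

-- B's _drop loop: drop the first m occurrences of x from the RLE
def pvDrop : List (Int × Int) → Int → Int → List (Int × Int)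
  | [], _, _ => []
  | (v, k) :: rest, x, m =>
    if 0 < m ∧ v = x then
      (if 0 < k - (if k < m then k else m) then [(v, k - (if k < m then k else m))] else []) ++
        pvDrop rest x (m - (if k < m then k else m))
    else
      (if 0 < k then [(v, k)] else []) ++ pvDrop rest x m

-- B's solve; the Nat fuel only makes the recursion structurally total (B's Python recursion
-- needs none); can_form_sets_alt supplies enough fuel for every hand
def pvSolveR : Nat → List (Int × Int) → PySem.Dict (List (Int × Int)) Bool →
    Bool × PySem.Dict (List (Int × Int)) Bool
  | 0, _, memo => (false, memo)
  | fuel + 1, s, memo =>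
    match memo.get? s with
    | some r => (r, memo)
    | none =>
      match s with
      | [] => (true, memo.insert s true)
      | (x, _) :: _ =>
        let p :=
          if 3 ≤ pvRleCount s x then pvSolveR fuel (pvDrop s x 3) memo
          else (false, memo)
        let q :=
          if !p.1 && decide (x ≤ 26) then
            if 1 ≤ pvRleCount s (x + 1) ∧ 1 ≤ pvRleCount s (x + 2) then
              pvSolveR fuel (pvDrop (pvDrop (pvDrop s x 1) (x + 1) 1) (x + 2) 1) p.2
            else (false, p.2)
          else p
        (q.1, q.2.insert s q.1)

def can_form_sets_alt (tile_ids : List Int) : Bool :=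
  (pvSolveR (tile_ids.length + 1) (pvEncode tile_ids) PySem.Dict.empty).1

-- ===== PRECONDITION & SPEC =====
def Spec_can_form_sets (tile_ids : List Int) (out : Bool) : Prop := out = can_form_sets_alt tile_ids
instance (tile_ids : List Int) (out : Bool) : Decidable (Spec_can_form_sets tile_ids out) := by unfold Spec_can_form_sets; infer_instance

-- ===== CLAIM (what is proved, stated in full; the proofs are below) =====
def Claim_equal_can_form_sets : Prop := ∀ (tile_ids : List Int), Dom_can_form_sets tile_ids → Spec_can_form_sets tile_ids (can_form_sets tile_ids)

-- ===== LEMMAS AND PROOFS =====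

-- unfolding equations for A's port
theorem can_form_sets_nil : can_form_sets [] = true := by
  rw [can_form_sets]

theorem can_form_sets_cons (x : Int) (tl : List Int) :
    can_form_sets (x :: tl) =
      ((if 3 ≤ PySem.List.count (x :: tl) x then
          can_form_sets (pvRemoveN (x :: tl) x 3) else false)
       ||
       (if x ≤ 26 ∧ (x + 1) ∈ (x :: tl) ∧ (x + 2) ∈ (x :: tl) then
          can_form_sets (pvRemove1 (pvRemove1 (pvRemove1 (x :: tl) x) (x + 1)) (x + 2))
        else false)) := by
  rw [can_form_sets]
  simp only [dite_eq_ite]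

-- structural lemmas about A's removals
theorem pvRemove1_nil (x : Int) : pvRemove1 [] x = [] := rfl

theorem pvRemoveN_nil (x : Int) : ∀ n, pvRemoveN [] x n = [] := by
  intro n
  induction n with
  | zero => rfl
  | succ m ih => simpa [pvRemoveN, pvRemove1_nil] using ih

theorem pvRemove1_cons_self (x : Int) (ts : List Int) : pvRemove1 (x :: ts) x = ts := by
  simp [pvRemove1, PySem.List.remove?_cons_self]

theorem pvRemove1_cons_ne {t x : Int} (ts : List Int) (h : t ≠ x) :
    pvRemove1 (t :: ts) x = t :: pvRemove1 ts x := by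
  cases hx : PySem.List.remove? ts x <;>
    simp [pvRemove1, PySem.List.remove?_cons_of_ne ts h, hx]

theorem pvRemoveN_cons_self (x : Int) (ts : List Int) (n : Nat) :
    pvRemoveN (x :: ts) x (n + 1) = pvRemoveN ts x n := by
  simp [pvRemoveN, pvRemove1_cons_self]

theorem pvRemoveN_cons_ne {t x : Int} (h : t ≠ x) :
    ∀ (n : Nat) (ts : List Int), pvRemoveN (t :: ts) x n = t :: pvRemoveN ts x n := by
  intro n
  induction n with
  | zero => intro ts; rfl
  | succ m ih => intro ts; simp [pvRemoveN, pvRemove1_cons_ne ts h, ih]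

theorem pvRemoveN_replicate_ne {v x : Int} (h : v ≠ x) :
    ∀ (a : Nat) (L : List Int) (n : Nat),
      pvRemoveN (List.replicate a v ++ L) x n = List.replicate a v ++ pvRemoveN L x n := by
  intro a
  induction a with
  | zero => intro L n; simp
  | succ b ih =>
    intro L n
    simp only [List.replicate_succ, List.cons_append, pvRemoveN_cons_ne h, ih]

theorem pvRemoveN_replicate_self (x : Int) :
    ∀ (n a : Nat) (L : List Int),
      pvRemoveN (List.replicate a x ++ L) x n =
        if n ≤ a then List.replicate (a - n) x ++ L else pvRemoveN L x (n - a) := by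
  intro n
  induction n with
  | zero => intro a L; simp [pvRemoveN]
  | succ m ih =>
    intro a L
    cases a with
    | zero => simp
    | succ b =>
      simp only [List.replicate_succ, List.cons_append, pvRemoveN_cons_self, ih]
      by_cases hmb : m ≤ b
      · rw [if_pos hmb, if_pos (by omega : m + 1 ≤ b + 1),
          (by omega : b + 1 - (m + 1) = b - m)]
      · rw [if_neg hmb, if_neg (by omega : ¬m + 1 ≤ b + 1),
          (by omega : m + 1 - (b + 1) = m - b)]

-- decoding run-length-encoded hands (proof device; B never decodes)
def pvDecode : List (Int × Int) → List Int
  | [] => []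
  | (v, k) :: rest => List.replicate k.toNat v ++ pvDecode rest

-- all run lengths positive (true of every state B reaches)
def pvPos (s : List (Int × Int)) : Prop := ∀ p ∈ s, 0 < p.2

theorem pvDecode_append : ∀ (a b : List (Int × Int)),
    pvDecode (a ++ b) = pvDecode a ++ pvDecode b := by
  intro a
  induction a with
  | nil => intro b; rfl
  | cons p rest ih =>
    intro b
    cases p with
    | mk v k => simp [pvDecode, ih]

theorem pvEncodeStep_spec {acc : List (Int × Int)} (t : Int) (hp : pvPos acc) :
    pvPos (pvEncodeStep acc t) ∧ pvDecode (pvEncodeStep acc t) = pvDecode acc ++ [t] := by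
  unfold pvEncodeStep
  cases hl : acc.getLast? with
  | none =>
    have h0 : acc = [] := List.getLast?_eq_none_iff.mp hl
    subst h0
    dsimp only
    refine ⟨?_, by simp [pvDecode]⟩
    intro p hp2
    simp only [List.nil_append, List.mem_singleton] at hp2
    simp [hp2]
  | some p =>
    obtain ⟨v, k⟩ := p
    obtain ⟨l', rfl⟩ := List.getLast?_eq_some_iff.mp hl
    dsimp only
    have hk : 0 < k := hp (v, k) (by simp)
    have hdl : (l' ++ [(v, k)]).dropLast = l' := by simp
    have hkt : (k + 1).toNat = k.toNat + 1 := by omega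
    by_cases hvt : v = t
    · subst hvt
      rw [if_pos rfl, hdl]
      constructor
      · intro p hp2
        rcases List.mem_append.mp hp2 with h | h
        · exact hp p (List.mem_append.mpr (Or.inl h))
        · simp only [List.mem_singleton] at h
          subst h
          simp only []
          omega
      · rw [pvDecode_append, pvDecode_append]
        simp only [pvDecode, List.append_nil]
        rw [hkt, List.replicate_succ']
        simp
    · rw [if_neg hvt]
      refine ⟨?_, by rw [pvDecode_append]; simp [pvDecode]⟩
      intro p hp2
      rcases List.mem_append.mp hp2 with h | h
      · exact hp p h
      · simp only [List.mem_singleton] at h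
        subst h
        simp

theorem pvEncode_spec : ∀ (ids : List Int) (acc : List (Int × Int)), pvPos acc →
    pvPos (ids.foldl pvEncodeStep acc) ∧
      pvDecode (ids.foldl pvEncodeStep acc) = pvDecode acc ++ ids := by
  intro ids
  induction ids with
  | nil => intro acc hp; simpa using hp
  | cons t ts ih =>
    intro acc hp
    obtain ⟨h1, h2⟩ := pvEncodeStep_spec t hp
    obtain ⟨h3, h4⟩ := ih (pvEncodeStep acc t) h1
    refine ⟨by simpa using h3, ?_⟩
    simp only [List.foldl_cons] at *
    rw [h4, h2, List.append_assoc]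
    rfl

theorem pvEncode_pos (ids : List Int) : pvPos (pvEncode ids) :=
  (pvEncode_spec ids [] (by intro p h; cases h)).1

theorem pvDecode_pvEncode (ids : List Int) : pvDecode (pvEncode ids) = ids := by
  have := (pvEncode_spec ids [] (by intro p h; cases h)).2
  simpa [pvDecode] using this

theorem pvRleCount_eq : ∀ (s : List (Int × Int)), pvPos s → ∀ (x : Int),
    pvRleCount s x = (List.count x (pvDecode s) : Int) := by
  intro s
  induction s with
  | nil => intro _ x; simp [pvRleCount, pvDecode]
  | cons p rest ih =>
    intro hp x
    obtain ⟨v, k⟩ := p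
    have hk : 0 < k := hp (v, k) (by simp)
    have hrest : pvPos rest := fun q hq => hp q (List.mem_cons_of_mem _ hq)
    simp only [pvRleCount, pvDecode, List.count_append, ih hrest x]
    by_cases hvx : v = x
    · subst hvx
      simp [List.count_replicate]
      omega
    · have hxv : ¬x = v := fun h => hvx h.symm
      simp [List.count_replicate, hvx, hxv]

theorem pvDrop_cons (v k : Int) (rest : List (Int × Int)) (x m : Int) :
    pvDrop ((v, k) :: rest) x m =
      if 0 < m ∧ v = x then
        (if 0 < k - (if k < m then k else m) then [(v, k - (if k < m then k else m))] else []) ++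
          pvDrop rest x (m - (if k < m then k else m))
      else
        (if 0 < k then [(v, k)] else []) ++ pvDrop rest x m := rfl

theorem pvPos_pvDrop : ∀ (s : List (Int × Int)) (x m : Int),
    pvPos (pvDrop s x m) := by
  intro s
  induction s with
  | nil => intro x m p h; cases h
  | cons q rest ih =>
    intro x m p h
    obtain ⟨v, k⟩ := q
    rw [pvDrop_cons] at h
    by_cases hgo : 0 < m ∧ v = x
    · rw [if_pos hgo] at h
      rcases List.mem_append.mp h with h1 | h1
      · by_cases hz : 0 < k - (if k < m then k else m)
        · rw [if_pos hz] at h1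
          simp only [List.mem_singleton] at h1
          subst h1
          exact hz
        · rw [if_neg hz] at h1
          cases h1
      · exact ih x _ p h1
    · rw [if_neg hgo] at h
      rcases List.mem_append.mp h with h1 | h1
      · by_cases hzk : 0 < k
        · rw [if_pos hzk] at h1
          simp only [List.mem_singleton] at h1
          subst h1
          exact hzk
        · rw [if_neg hzk] at h1
          cases h1
      · exact ih x m p h1

theorem pvDrop_nonpos : ∀ (s : List (Int × Int)), pvPos s → ∀ (x m : Int), m ≤ 0 →
    pvDrop s x m = s := by
  intro s
  induction s with
  | nil => intro _ x m _; rfl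
  | cons q rest ih =>
    intro hp x m hm
    obtain ⟨v, k⟩ := q
    have hk : 0 < k := hp (v, k) (by simp)
    have hrest : pvPos rest := fun q hq => hp q (List.mem_cons_of_mem _ hq)
    rw [pvDrop_cons, if_neg (by omega : ¬(0 < m ∧ v = x)), if_pos hk, ih hrest x m hm]
    simp

theorem pvDecode_pvDrop : ∀ (s : List (Int × Int)), pvPos s → ∀ (x m : Int), 0 ≤ m →
    pvDecode (pvDrop s x m) = pvRemoveN (pvDecode s) x m.toNat := by
  intro s
  induction s with
  | nil => intro _ x m _; simp [pvDrop, pvDecode, pvRemoveN_nil]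
  | cons q rest ih =>
    intro hp x m hm
    obtain ⟨v, k⟩ := q
    have hk : 0 < k := hp (v, k) (by simp)
    have hrest : pvPos rest := fun q hq => hp q (List.mem_cons_of_mem _ hq)
    have hdc : pvDecode ((v, k) :: rest) = List.replicate k.toNat v ++ pvDecode rest := rfl
    rw [pvDrop_cons, hdc]
    by_cases hgo : 0 < m ∧ v = x
    · obtain ⟨hm0, hveq⟩ := hgo
      subst hveq
      rw [if_pos ⟨hm0, rfl⟩]
      by_cases hkm : k < m
      · -- the whole run is consumed
        rw [if_pos hkm, if_neg (by omega : ¬(0:Int) < k - k), List.nil_append,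
          ih hrest v (m - k) (by omega), pvRemoveN_replicate_self,
          if_neg (by omega : ¬m.toNat ≤ k.toNat)]
        congr 1
        omega
      · rw [if_neg hkm]
        by_cases hz : (0:Int) < k - m
        · -- the run survives, shortened by m
          rw [if_pos hz, (by ring : m - m = (0:Int)), pvDrop_nonpos rest hrest v 0 le_rfl,
            pvRemoveN_replicate_self, if_pos (by omega : m.toNat ≤ k.toNat)]
          have h1 : pvDecode ((v, k - m) :: rest) =
              List.replicate (k - m).toNat v ++ pvDecode rest := rfl
          rw [List.singleton_append, h1]
          congr 2
          omega
        · -- k = m exactly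
          rw [if_neg hz, (by ring : m - m = (0:Int)), pvDrop_nonpos rest hrest v 0 le_rfl,
            List.nil_append, pvRemoveN_replicate_self,
            if_pos (by omega : m.toNat ≤ k.toNat), (by omega : k.toNat - m.toNat = 0)]
          simp
    · rw [if_neg hgo, if_pos hk, List.singleton_append]
      rcases (by omega : m = 0 ∨ (0 < m ∧ v ≠ x)) with hm0 | ⟨hmp, hvx⟩
      · subst hm0
        rw [pvDrop_nonpos rest hrest x 0 le_rfl]
        simp [pvDecode, pvRemoveN]
      · have h1 : pvDecode ((v, k) :: pvDrop rest x m) =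
            List.replicate k.toNat v ++ pvDecode (pvDrop rest x m) := rfl
        rw [h1, ih hrest x m hm, pvRemoveN_replicate_ne hvx]

theorem pvDecode_cons_pos {x k : Int} {rest : List (Int × Int)} (hk : 0 < k) :
    pvDecode ((x, k) :: rest) =
      x :: (List.replicate (k.toNat - 1) x ++ pvDecode rest) := by
  have : k.toNat = (k.toNat - 1) + 1 := by omega
  simp only [pvDecode]
  rw [this, List.replicate_succ]
  simp

-- the memo invariant: every stored value is A's answer for the decoded key
def MemoOK (memo : PySem.Dict (List (Int × Int)) Bool) : Prop :=
  ∀ k r, memo.get? k = some r → r = can_form_sets (pvDecode k)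

theorem memoOK_empty : MemoOK PySem.Dict.empty := by
  intro k r h
  simp [PySem.Dict.get?_empty] at h

theorem memoOK_insert {memo : PySem.Dict (List (Int × Int)) Bool} (hm : MemoOK memo)
    {k : List (Int × Int)} {r : Bool} (hr : r = can_form_sets (pvDecode k)) :
    MemoOK (memo.insert k r) := by
  intro k2 r2 h
  rw [PySem.Dict.get?_insert] at h
  split at h
  · rename_i hk
    cases h
    rw [hk]
    exact hr
  · exact hm _ _ h

theorem pvConclude {E : Bool × PySem.Dict (List (Int × Int)) Bool} {key : List (Int × Int)}
    (h1 : E.1 = can_form_sets (pvDecode key)) (h2 : MemoOK E.2) :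
    E.1 = can_form_sets (pvDecode key) ∧ MemoOK (E.2.insert key E.1) :=
  ⟨h1, memoOK_insert h2 h1⟩

theorem pvSolveR_ok (F : Nat) : ∀ (s : List (Int × Int)), pvPos s →
    (pvDecode s).length < F →
    ∀ (memo : PySem.Dict (List (Int × Int)) Bool), MemoOK memo →
      (pvSolveR F s memo).1 = can_form_sets (pvDecode s) ∧ MemoOK (pvSolveR F s memo).2 := by
  induction F using Nat.strong_induction_on with
  | _ F IH =>
    intro s hpos hlen memo hm
    cases F with
    | zero => omega
    | succ f =>
      rw [pvSolveR.eq_def]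
      dsimp only
      cases hg : memo.get? s with
      | some r => exact ⟨hm _ _ hg, hm⟩
      | none =>
        cases s with
        | nil =>
          refine ⟨can_form_sets_nil.symm, ?_⟩
          exact memoOK_insert hm (by simp [pvDecode, can_form_sets_nil])
        | cons q rest =>
          cases q with
          | mk x k =>
            simp only [hg]
            have hk : 0 < k := hpos (x, k) (by simp)
            have hrest : pvPos rest := fun p hp => hpos p (List.mem_cons_of_mem _ hp)
            obtain ⟨tl, hdec⟩ : ∃ tl, pvDecode ((x, k) :: rest) = x :: tl :=
              ⟨_, pvDecode_cons_pos hk⟩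
            have hcnt_eq := pvRleCount_eq ((x, k) :: rest) hpos
            -- the two branch conditions, translated to the decoded hand
            have hcnt3 : (3 ≤ pvRleCount ((x, k) :: rest) x) ↔
                (3 ≤ PySem.List.count (x :: tl) x) := by
              rw [hcnt_eq x, hdec, PySem.List.count_eq]
              omega
            have hmem1 : (1 ≤ pvRleCount ((x, k) :: rest) (x + 1)) ↔ ((x + 1) ∈ x :: tl) := by
              rw [hcnt_eq (x + 1), hdec]
              rw [show ((x + 1) ∈ x :: tl) ↔ 0 < List.count (x + 1) (x :: tl) from
                (List.count_pos_iff).symm]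
              omega
            have hmem2 : (1 ≤ pvRleCount ((x, k) :: rest) (x + 2)) ↔ ((x + 2) ∈ x :: tl) := by
              rw [hcnt_eq (x + 2), hdec]
              rw [show ((x + 2) ∈ x :: tl) ↔ 0 < List.count (x + 2) (x :: tl) from
                (List.count_pos_iff).symm]
              omega
            by_cases hcnt : 3 ≤ pvRleCount ((x, k) :: rest) x
            · -- pung branch recurses
              have hcntA : 3 ≤ PySem.List.count (x :: tl) x := hcnt3.mp hcnt
              have hpdec : pvDecode (pvDrop ((x, k) :: rest) x 3) = pvRemoveN (x :: tl) x 3 := by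
                rw [pvDecode_pvDrop ((x, k) :: rest) hpos x 3 (by omega), hdec]
                rfl
              have hplen : (pvDecode (pvDrop ((x, k) :: rest) x 3)).length < f := by
                have h3 := pvRemoveN_length (n := 3) hcntA
                have hcle : (3 : Nat) ≤ (x :: tl).length := by
                  have := PySem.List.count_eq (x :: tl) x
                  have := List.count_le_length (l := x :: tl) (a := x)
                  omega
                rw [hpdec, ← hdec] at *
                omega
              obtain ⟨hP1, hP2⟩ := IH f (by omega) (pvDrop ((x, k) :: rest) x 3)
                (pvPos_pvDrop _ x 3) hplen memo hm
              simp only [if_pos hcnt]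
              set P := pvSolveR f (pvDrop ((x, k) :: rest) x 3) memo with hP
              cases hb : P.1 with
              | true =>
                apply pvConclude
                · simp only [hb, Bool.not_true, Bool.false_and, Bool.false_eq_true, if_false]
                  rw [hb] at hP1
                  rw [hdec, can_form_sets_cons, if_pos hcntA, ← hpdec, ← hP1]
                  simp
                · simp only [hb, Bool.not_true, Bool.false_and, Bool.false_eq_true, if_false]
                  exact hP2
              | false =>
                simp only [hb, Bool.not_false, Bool.true_and]
                rw [hb] at hP1
                by_cases hx : x ≤ 26
                · simp only [hx, decide_true, if_true]
                  by_cases hmm : 1 ≤ pvRleCount ((x, k) :: rest) (x + 1) ∧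
                      1 ≤ pvRleCount ((x, k) :: rest) (x + 2)
                  · -- chow branch recurses
                    rw [if_pos hmm]
                    have hm1 : (x + 1) ∈ x :: tl := hmem1.mp hmm.1
                    have hm2 : (x + 2) ∈ x :: tl := hmem2.mp hmm.2
                    have hxx : x ∈ x :: tl := List.mem_cons_self
                    -- three single drops decode to A's three removes
                    have hd1 : pvDecode (pvDrop ((x, k) :: rest) x 1) =
                        pvRemove1 (x :: tl) x := by
                      rw [pvDecode_pvDrop ((x, k) :: rest) hpos x 1 (by omega), hdec]
                      rfl
                    have hd2 : pvDecode (pvDrop (pvDrop ((x, k) :: rest) x 1) (x + 1) 1) =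
                        pvRemove1 (pvRemove1 (x :: tl) x) (x + 1) := by
                      rw [pvDecode_pvDrop _ (pvPos_pvDrop _ x 1) (x + 1) 1 (by omega), hd1]
                      rfl
                    have hd3 : pvDecode (pvDrop (pvDrop (pvDrop ((x, k) :: rest) x 1)
                        (x + 1) 1) (x + 2) 1) =
                        pvRemove1 (pvRemove1 (pvRemove1 (x :: tl) x) (x + 1)) (x + 2) := by
                      rw [pvDecode_pvDrop _ (pvPos_pvDrop _ (x + 1) 1) (x + 2) 1 (by omega), hd2]
                      rfl
                    -- lengths of the three removes
                    have h1' : (x + 1) ∈ pvRemove1 (x :: tl) x := by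
                      rw [pvRemove1_eq_erase hxx]
                      exact (List.mem_erase_of_ne (by omega)).mpr hm1
                    have h2' : (x + 2) ∈ pvRemove1 (pvRemove1 (x :: tl) x) (x + 1) := by
                      rw [pvRemove1_eq_erase h1', pvRemove1_eq_erase hxx]
                      refine (List.mem_erase_of_ne (by omega)).mpr ?_
                      exact (List.mem_erase_of_ne (by omega)).mpr hm2
                    have l0 := pvRemove1_length_of_mem hxx
                    have l1 := pvRemove1_length_of_mem h1'
                    have l2 := pvRemove1_length_of_mem h2'
                    have hclen : (pvDecode (pvDrop (pvDrop (pvDrop ((x, k) :: rest) x 1)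
                        (x + 1) 1) (x + 2) 1)).length < f := by
                      rw [hd3, ← hdec] at *
                      omega
                    obtain ⟨hQ1, hQ2⟩ := IH f (by omega) _
                      (pvPos_pvDrop _ (x + 2) 1) hclen P.2 hP2
                    apply pvConclude
                    · rw [hQ1, hd3, hdec, can_form_sets_cons, if_pos hcntA, ← hpdec, ← hP1,
                        if_pos ⟨hx, hm1, hm2⟩]
                      simp
                    · exact hQ2
                  · rw [if_neg hmm]
                    refine pvConclude (E := (false, P.2)) ?_ ?_
                    · rw [hdec, can_form_sets_cons, if_pos hcntA, ← hpdec, ← hP1,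
                        if_neg (fun hc => hmm ⟨hmem1.mpr hc.2.1, hmem2.mpr hc.2.2⟩)]
                      simp
                    · exact hP2
                · simp only [hx, decide_false, Bool.false_eq_true, Bool.and_false, if_false]
                  apply pvConclude
                  · rw [hb, hdec, can_form_sets_cons, if_pos hcntA, ← hpdec, ← hP1,
                      if_neg (fun hc => hx hc.1)]
                    simp
                  · exact hP2
            · -- no pung from the first tile
              have hcntA : ¬3 ≤ PySem.List.count (x :: tl) x := fun h => hcnt (hcnt3.mpr h)
              simp only [if_neg hcnt, Bool.not_false, Bool.true_and]
              by_cases hx : x ≤ 26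
              · simp only [hx, decide_true, if_true]
                by_cases hmm : 1 ≤ pvRleCount ((x, k) :: rest) (x + 1) ∧
                    1 ≤ pvRleCount ((x, k) :: rest) (x + 2)
                · rw [if_pos hmm]
                  have hm1 : (x + 1) ∈ x :: tl := hmem1.mp hmm.1
                  have hm2 : (x + 2) ∈ x :: tl := hmem2.mp hmm.2
                  have hxx : x ∈ x :: tl := List.mem_cons_self
                  have hd1 : pvDecode (pvDrop ((x, k) :: rest) x 1) =
                      pvRemove1 (x :: tl) x := by
                    rw [pvDecode_pvDrop ((x, k) :: rest) hpos x 1 (by omega), hdec]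
                    rfl
                  have hd2 : pvDecode (pvDrop (pvDrop ((x, k) :: rest) x 1) (x + 1) 1) =
                      pvRemove1 (pvRemove1 (x :: tl) x) (x + 1) := by
                    rw [pvDecode_pvDrop _ (pvPos_pvDrop _ x 1) (x + 1) 1 (by omega), hd1]
                    rfl
                  have hd3 : pvDecode (pvDrop (pvDrop (pvDrop ((x, k) :: rest) x 1)
                      (x + 1) 1) (x + 2) 1) =
                      pvRemove1 (pvRemove1 (pvRemove1 (x :: tl) x) (x + 1)) (x + 2) := by
                    rw [pvDecode_pvDrop _ (pvPos_pvDrop _ (x + 1) 1) (x + 2) 1 (by omega), hd2]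
                    rfl
                  have h1' : (x + 1) ∈ pvRemove1 (x :: tl) x := by
                    rw [pvRemove1_eq_erase hxx]
                    exact (List.mem_erase_of_ne (by omega)).mpr hm1
                  have h2' : (x + 2) ∈ pvRemove1 (pvRemove1 (x :: tl) x) (x + 1) := by
                    rw [pvRemove1_eq_erase h1', pvRemove1_eq_erase hxx]
                    refine (List.mem_erase_of_ne (by omega)).mpr ?_
                    exact (List.mem_erase_of_ne (by omega)).mpr hm2
                  have l0 := pvRemove1_length_of_mem hxx
                  have l1 := pvRemove1_length_of_mem h1'
                  have l2 := pvRemove1_length_of_mem h2'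
                  have hclen : (pvDecode (pvDrop (pvDrop (pvDrop ((x, k) :: rest) x 1)
                      (x + 1) 1) (x + 2) 1)).length < f := by
                    rw [hd3, ← hdec] at *
                    omega
                  obtain ⟨hQ1, hQ2⟩ := IH f (by omega) _
                    (pvPos_pvDrop _ (x + 2) 1) hclen memo hm
                  apply pvConclude
                  · rw [hQ1, hd3, hdec, can_form_sets_cons, if_neg hcntA,
                      if_pos ⟨hx, hm1, hm2⟩]
                    simp
                  · exact hQ2
                · rw [if_neg hmm]
                  refine pvConclude (E := (false, memo)) ?_ ?_
                  · rw [hdec, can_form_sets_cons, if_neg hcntA,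
                      if_neg (fun hc => hmm ⟨hmem1.mpr hc.2.1, hmem2.mpr hc.2.2⟩)]
                    simp
                  · exact hm
              · simp only [hx, decide_false, Bool.false_eq_true, Bool.and_false, if_false]
                refine pvConclude (E := (false, memo)) ?_ ?_
                · rw [hdec, can_form_sets_cons, if_neg hcntA,
                    if_neg (fun hc => hx hc.1)]
                  simp
                · exact hm

-- ===== VERDICT (by name: the statement is the Claim_ definition above) =====
theorem can_form_sets_spec : Claim_equal_can_form_sets := by
  intro tile_ids _
  unfold Spec_can_form_sets can_form_sets_alt
  have h := (pvSolveR_ok (tile_ids.length + 1) (pvEncode tile_ids) (pvEncode_pos tile_ids)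
    (by rw [pvDecode_pvEncode]; omega) PySem.Dict.empty memoOK_empty).1
  rw [pvDecode_pvEncode] at h
  exact h.symm
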